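-- pv_equiv track=rewrite | github.com/koubaj/alp | SEM/web_source/filajan1.py | karty_v_ruce
-- ===== SOURCE A (Python) =====
-- def rotate_card(pole:list):
--     '''
--     Vstup = 2D pole ktere chceme zrotovat
--     Vystup = zrotovane 2D pole
--     '''
--     kopie = []
--     for wtf in range(len(pole)):
--         kopie.append(pole[wtf][:])
--     rotace = []
--     for i in range(len(kopie[0])):
--         b = []
--         for j in range(len(kopie)-1,-1,-1):
--             b.append(kopie[j][i])
--         rotace.append(b)
--     return rotace
--
-- def karty_v_ruce(pole):
--         karty_ruka = []
--         for karta in pole: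
--             karty_ruka.append(karta)
--             for j in range(3):
--                 rotace = rotate_card(karta)
--                 karty_ruka.append(rotace)
--                 karta = rotace
--         return karty_ruka
-- ===== SOURCE B (Python) =====
-- def karty_v_ruce(pole):
--     out = []
--     for card in pole:
--         m, c = len(card), len(card[0])
--         rot90 = [[card[m - 1 - k][i] for k in range(m)] for i in range(c)]
--         rot180 = [[card[m - 1 - i][c - 1 - j] for j in range(c)] for i in range(m)]
--         rot270 = [[card[k][c - 1 - i] for k in range(m)] for i in range(c)]
--         out += [card, rot90, rot180, rot270]
--     return out
-- ===== Notes on version B (the rewrite author's own statement) =====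
-- stated objective: alternative
-- what changed: B computes the 90/180/270-degree orientations of each card directly from the original card via per-angle index formulas (transpose/reverse style) instead of A's chaining of three successive clockwise rotate_card calls with intermediate copies.
import Mathlib
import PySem

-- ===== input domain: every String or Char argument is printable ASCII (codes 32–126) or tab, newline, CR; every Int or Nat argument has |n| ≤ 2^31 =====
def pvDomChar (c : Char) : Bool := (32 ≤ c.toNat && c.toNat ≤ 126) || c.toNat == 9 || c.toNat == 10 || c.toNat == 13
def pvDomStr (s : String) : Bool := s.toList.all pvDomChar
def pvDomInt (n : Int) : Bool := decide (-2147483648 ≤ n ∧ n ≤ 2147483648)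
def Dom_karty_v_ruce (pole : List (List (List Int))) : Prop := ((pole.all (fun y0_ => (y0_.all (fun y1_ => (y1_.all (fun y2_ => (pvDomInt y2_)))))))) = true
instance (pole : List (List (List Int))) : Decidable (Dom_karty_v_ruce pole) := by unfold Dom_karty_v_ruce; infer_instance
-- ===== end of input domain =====

-- B computes the four orientations of each card directly from the original by index formulas
-- instead of chaining three successive clockwise rotations; objective: alternative decomposition.

-- ===== PORT A =====
-- literal port of rotate_card: row copies via slice, range(len(kopie[0])), countdown range;
-- indexing is pyGetD with a default — inside Pre_ every index is in range, so the default is never read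
def rotate_card (pole : List (List Int)) : List (List Int) :=
  let kopie := pole.map (fun row => PySem.List.slice row none none)
  (List.range (PySem.List.pyGetD kopie 0 []).length).map (fun (i : Nat) =>
    (PySem.List.pyRange ((kopie.length : Int) - 1) (-1) (-1)).map (fun j =>
      PySem.List.pyGetD (PySem.List.pyGetD kopie j []) (i : Int) 0))

def karty_v_ruce (pole : List (List (List Int))) : List (List (List Int)) :=
  pole.foldl (fun karty_ruka karta =>
    ((List.range 3).foldl (fun (st : List (List (List Int)) × List (List Int)) _ =>
        let rotace := rotate_card st.2
        (st.1 ++ [rotace], rotace)) (karty_ruka ++ [karta], karta)).1) []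

-- ===== PORT B =====
-- literal port of Source B: card[0] is headI, plain in-range indexing card[i][j] is getD — inside Pre_
-- every index is in range, so defaults are never read
def karty_v_ruce_alt (pole : List (List (List Int))) : List (List (List Int)) :=
  pole.foldl (fun out card =>
    let m := card.length
    let c := card.headI.length
    let rot90  := (List.range c).map (fun i => (List.range m).map (fun k => (card.getD (m-1-k) []).getD i 0))
    let rot180 := (List.range m).map (fun i => (List.range c).map (fun j => (card.getD (m-1-i) []).getD (c-1-j) 0))
    let rot270 := (List.range c).map (fun i => (List.range m).map (fun k => (card.getD k []).getD (c-1-i) 0))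
    out ++ [card, rot90, rot180, rot270]) []

-- ===== PRECONDITION & SPEC =====
-- Pre_ excludes exactly the inputs on which the Python A raises IndexError: a card that is empty,
-- has an empty first row, or has some row shorter than its first row.
def Pre_karty_v_ruce (pole : List (List (List Int))) : Prop :=
  ∀ karta ∈ pole, 0 < karta.headI.length ∧ ∀ row ∈ karta, karta.headI.length ≤ row.length
instance (pole : List (List (List Int))) : Decidable (Pre_karty_v_ruce pole) := by
  unfold Pre_karty_v_ruce; infer_instance
def pvWitness_karty_v_ruce : List (List (List Int)) := [[[1, 2, 3], [4, 5, 6]]]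

def Spec_karty_v_ruce (pole : List (List (List Int))) (out : List (List (List Int))) : Prop := out = karty_v_ruce_alt pole
instance (pole : List (List (List Int))) (out : List (List (List Int))) : Decidable (Spec_karty_v_ruce pole out) := by unfold Spec_karty_v_ruce; infer_instance

-- ===== CLAIM (what is proved, stated in full; the proofs are below) =====
def Claim_equal_karty_v_ruce : Prop := ∀ (pole : List (List (List Int))), Dom_karty_v_ruce pole → Pre_karty_v_ruce pole → Spec_karty_v_ruce pole (karty_v_ruce pole)

-- ===== LEMMAS AND PROOFS =====

-- rotate_card in closed getD form (no precondition needed: all indexing is defaulted)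
theorem rotate_card_eq (g : List (List Int)) :
    rotate_card g = (List.range g.headI.length).map (fun i =>
      (List.range g.length).map (fun k => (g.getD (g.length - 1 - k) []).getD i 0)) := by
  unfold rotate_card
  have hs : g.map (fun row => PySem.List.slice row none none) = g := by
    simp [PySem.List.slice_none_none]
  simp only [hs]
  have h0 : PySem.List.pyGetD g 0 [] = g.headI := by
    cases g with
    | nil => rfl
    | cons a t => simp [PySem.List.pyGetD, PySem.List.pyGet?, PySem.List.pyIdx?, List.headI]
  rw [h0, PySem.List.pyRange_neg_one,
    show ((g.length : Int) - 1 - (-1)).toNat = g.length by omega]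
  refine List.map_congr_left (fun i hi => ?_)
  rw [List.map_map]
  refine List.map_congr_left (fun k hk => ?_)
  simp only [List.mem_range] at hk
  have hc : (g.length : Int) - 1 - (k : Int) = ((g.length - 1 - k : Nat) : Int) := by omega
  simp [Function.comp, hc, PySem.List.pyGetD_natCast]

theorem headI_map_range {a : Type} [Inhabited a] (f : Nat → a) (n : Nat) (h : 0 < n) :
    ((List.range n).map f).headI = f 0 := by
  obtain ⟨n', rfl⟩ : ∃ n', n = n' + 1 := ⟨n - 1, by omega⟩
  rw [List.range_succ_eq_map]; simp [List.headI]

-- second clockwise rotation collapses to the 180° index formula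
theorem rotate2_eq (g : List (List Int)) (hc : 0 < g.headI.length) :
    rotate_card (rotate_card g) = (List.range g.length).map (fun i =>
      (List.range g.headI.length).map (fun j =>
        (g.getD (g.length - 1 - i) []).getD (g.headI.length - 1 - j) 0)) := by
  rw [rotate_card_eq g, rotate_card_eq, headI_map_range _ _ hc]
  simp only [List.length_map, List.length_range]
  refine List.map_congr_left (fun i hi => ?_)
  simp only [List.mem_range] at hi
  refine List.map_congr_left (fun j hj => ?_)
  simp only [List.mem_range] at hj
  rw [PySem.List.getD_map_range _ _ _ _ (by omega),
      PySem.List.getD_map_range _ _ _ _ (by omega)]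

-- third clockwise rotation collapses to the 270° index formula
theorem rotate3_eq (g : List (List Int)) (hc : 0 < g.headI.length) :
    rotate_card (rotate_card (rotate_card g)) = (List.range g.headI.length).map (fun i =>
      (List.range g.length).map (fun k => (g.getD k []).getD (g.headI.length - 1 - i) 0)) := by
  have hm : 0 < g.length := by
    cases g with
    | nil => exact absurd hc (by decide)
    | cons a t => simp
  rw [rotate2_eq g hc, rotate_card_eq, headI_map_range _ _ hm]
  simp only [List.length_map, List.length_range]
  refine List.map_congr_left (fun i hi => ?_)
  simp only [List.mem_range] at hi
  refine List.map_congr_left (fun k hk => ?_)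
  simp only [List.mem_range] at hk
  rw [PySem.List.getD_map_range _ _ _ _ (by omega),
      PySem.List.getD_map_range _ _ _ _ (by omega)]
  congr 2
  omega

-- ===== VERDICT (by name: the statement is the Claim_ definition above) =====
theorem karty_v_ruce_spec : Claim_equal_karty_v_ruce := by
  intro pole _hdom hpre
  unfold Spec_karty_v_ruce karty_v_ruce karty_v_ruce_alt
  refine PySem.List.foldl_congr_mem _ _ _ _ (fun acc karta hmem => ?_)
  obtain ⟨hc, -⟩ := hpre karta hmem
  simp only [show List.range 3 = [0, 1, 2] from rfl, List.foldl_cons, List.foldl_nil]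
  rw [rotate3_eq karta hc, rotate2_eq karta hc, rotate_card_eq karta]
  simp [List.append_assoc]
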